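-- pv_equiv track=rewrite | github.com/exueyuan/dpc_parser_module | mylib/txt_lib.py | cut_long_sentence
-- ===== SOURCE A (Python) =====
-- def cut_long_sentence(sentence, cut_length, cut_chars="；，：;、,:·"):
--     parts = []
--     s_len = len(sentence)
--     while s_len > cut_length:
--         cut_pos = cut_length - 1
--         for i in reversed(range(cut_length // 2, cut_pos)):
--             ch = sentence[i]
--             if ch in cut_chars:
--                 cut_pos = i + 1
--                 break
--         parts.append(sentence[:cut_pos])
--         sentence = sentence[cut_pos:]
--         s_len -= cut_pos
--
--     if s_len > 0:
--         parts.append(sentence)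
--     return parts
-- ===== SOURCE B (Python) =====
-- def cut_long_sentence(sentence, cut_length, cut_chars="；，：;、,:·"):
--     # Index-based walk (no re-slicing of the shrinking tail); one forward scan of
--     # the window tracking the last punctuation position against a set.
--     parts = []
--     n = len(sentence)
--     half = cut_length // 2
--     punct = set(cut_chars)
--     i = 0
--     while n - i > cut_length:
--         last = -1
--         for j, ch in enumerate(sentence[i + half : i + cut_length - 1]):
--             if ch in punct:
--                 last = j
--         cut_pos = half + last + 1 if last >= 0 else cut_length - 1
--         parts.append(sentence[i : i + cut_pos])
--         i += cut_pos
--     if i < n: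
--         parts.append(sentence[i:])
--     return parts
-- ===== Notes on version B (the rewrite author's own statement) =====
-- stated objective: alternative
-- what changed: B walks the sentence with a start index instead of repeatedly re-slicing the shrinking tail, and finds the cut point with one forward scan of the window that tracks the last punctuation position against a set, instead of A's backward position-by-position scan with early break.
import Mathlib
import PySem

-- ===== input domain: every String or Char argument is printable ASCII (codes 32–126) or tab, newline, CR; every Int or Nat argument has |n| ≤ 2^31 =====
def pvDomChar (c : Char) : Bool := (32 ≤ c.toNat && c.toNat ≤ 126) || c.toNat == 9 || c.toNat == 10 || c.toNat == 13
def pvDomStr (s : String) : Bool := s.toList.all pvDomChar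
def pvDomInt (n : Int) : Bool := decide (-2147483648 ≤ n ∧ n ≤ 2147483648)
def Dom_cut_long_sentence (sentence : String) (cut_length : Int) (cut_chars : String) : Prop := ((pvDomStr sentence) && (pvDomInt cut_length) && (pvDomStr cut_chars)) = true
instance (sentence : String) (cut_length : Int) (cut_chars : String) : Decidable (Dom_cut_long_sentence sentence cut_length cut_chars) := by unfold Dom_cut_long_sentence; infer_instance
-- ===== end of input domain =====

-- B replaces A's tail re-slicing by an index walk and A's backward early-break scan by one
-- forward last-match scan of the window against a set (alternative decomposition, same result).


-- ===== PORT A =====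
-- 'for i in reversed(range(lo, cut_length - 1)): if sentence[i] in cut_chars: cut_pos = i+1; break'
-- cnt = number of positions still to visit, i = lo + cnt - 1 downwards; d = the initial cut_pos.
-- sentence[i] is ported as getD (i is in range on every admitted input: lo ≤ i < cl-1 < len);
-- 'ch in cut_chars' on a single char is exactly membership of the char in the string.
def pvScanA (s : List Char) (cc : List Char) (lo : Nat) : Nat → Int → Int
  | 0, d => d
  | cnt+1, d =>
    let i := lo + cnt
    if cc.contains (s.getD i ' ') then ((i : Int) + 1) else pvScanA s cc lo cnt d

-- the while loop; fuel = initial length bounds the iterations (each one drops cut_pos ≥ 1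
-- characters on admitted inputs; on inputs where the Python loop never terminates — excluded
-- by Pre_ — the fuel runs out and nothing is claimed).
def pvLoopA (cc : List Char) (cl : Int) : Nat → List Char → List String
  | 0, s => if 0 < s.length then [String.ofList s] else []
  | fuel+1, s =>
    if (s.length : Int) > cl then
      let lo := (PySem.Int.floordiv cl 2).toNat
      let cnt := (cl - 1 - PySem.Int.floordiv cl 2).toNat
      let cut_pos := pvScanA s cc lo cnt (cl - 1)
      -- sentence[:cut_pos] / sentence[cut_pos:] with cut_pos ≥ 1 on admitted inputs
      String.ofList (s.take cut_pos.toNat) :: pvLoopA cc cl fuel (s.drop cut_pos.toNat)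
    else if 0 < s.length then [String.ofList s] else []

def cut_long_sentence (sentence : String) (cut_length : Int) (cut_chars : String) : List String :=
  pvLoopA cut_chars.toList cut_length sentence.toList.length sentence.toList

-- ===== PORT B =====
-- 'last = -1; for j, ch in enumerate(window): if ch in punct: last = j'
def pvLastHit (punct : PySem.Set Char) (w : List Char) : Int :=
  (PySem.List.enumerate w 0).foldl (fun last p => if PySem.Set.contains punct p.2 then p.1 else last) (-1)

-- the while loop over the start index i; same fuel discipline as pvLoopA.
def pvLoopB (full : List Char) (cl half : Int) (punct : PySem.Set Char) : Nat → Nat → List String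
  | 0, i => if i < full.length then [String.ofList (full.drop i)] else []
  | fuel+1, i =>
    if (full.length : Int) - i > cl then
      let w := PySem.List.slice full (some ((i : Int) + half)) (some ((i : Int) + cl - 1))
      let last := pvLastHit punct w
      let cut_pos : Int := if 0 ≤ last then half + last + 1 else cl - 1
      String.ofList (PySem.List.slice full (some (i : Int)) (some ((i : Int) + cut_pos))) ::
        pvLoopB full cl half punct fuel (i + cut_pos.toNat)
    else if i < full.length then [String.ofList (full.drop i)] else []

def cut_long_sentence_alt (sentence : String) (cut_length : Int) (cut_chars : String) : List String :=
  pvLoopB sentence.toList cut_length (PySem.Int.floordiv cut_length 2)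
    (PySem.Set.ofList cut_chars.toList) sentence.toList.length 0

-- ===== PRECONDITION & SPEC =====
-- Pre_ excludes exactly the inputs on which the Python A never returns: with cut_length ≤ 1 and a
-- sentence longer than cut_length the while loop makes no progress (cut_pos ≤ 0) and runs forever.
def Pre_cut_long_sentence (sentence : String) (cut_length : Int) (cut_chars : String) : Prop :=
  2 ≤ cut_length ∨ (sentence.toList.length : Int) ≤ cut_length
instance (sentence : String) (cut_length : Int) (cut_chars : String) : Decidable (Pre_cut_long_sentence sentence cut_length cut_chars) := by unfold Pre_cut_long_sentence; infer_instance

def pvWitness_cut_long_sentence : String × Int × String := ("hello,world and more", 6, ",; ")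

def Spec_cut_long_sentence (sentence : String) (cut_length : Int) (cut_chars : String) (out : List String) : Prop := out = cut_long_sentence_alt sentence cut_length cut_chars
instance (sentence : String) (cut_length : Int) (cut_chars : String) (out : List String) : Decidable (Spec_cut_long_sentence sentence cut_length cut_chars out) := by unfold Spec_cut_long_sentence; infer_instance

-- ===== CLAIM (what is proved, stated in full; the proofs are below) =====
def Claim_equal_cut_long_sentence : Prop := ∀ (sentence : String) (cut_length : Int) (cut_chars : String), Dom_cut_long_sentence sentence cut_length cut_chars → Pre_cut_long_sentence sentence cut_length cut_chars → Spec_cut_long_sentence sentence cut_length cut_chars (cut_long_sentence sentence cut_length cut_chars)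

-- ===== LEMMAS AND PROOFS =====

-- B's forward last-hit fold satisfies the snoc recurrence.
theorem pvLastHit_snoc (punct : PySem.Set Char) (w : List Char) (a : Char) :
    pvLastHit punct (w ++ [a])
      = if PySem.Set.contains punct a then (w.length : Int) else pvLastHit punct w := by
  unfold pvLastHit
  rw [PySem.List.enumerate_append, List.foldl_append]
  simp [PySem.List.enumerate_cons, PySem.List.enumerate_nil]

theorem pvLastHit_bounds (punct : PySem.Set Char) (w : List Char) :
    -1 ≤ pvLastHit punct w ∧ pvLastHit punct w < w.length := by
  induction w using List.reverseRecOn with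
  | nil => simp [pvLastHit, PySem.List.enumerate_nil]
  | append_singleton w a ih =>
    rw [pvLastHit_snoc]
    rcases ih with ⟨h1, h2⟩
    by_cases hc : PySem.Set.contains punct a <;> simp [hc] <;> omega

-- A's backward early-break scan equals B's forward last-hit over the same window.
theorem pvScanA_eq (s cc : List Char) (h : Nat) (d : Int) :
    ∀ cnt : Nat, h + cnt ≤ s.length →
      pvScanA s cc h cnt d
        = (if 0 ≤ pvLastHit (PySem.Set.ofList cc) ((s.drop h).take cnt)
           then (h : Int) + pvLastHit (PySem.Set.ofList cc) ((s.drop h).take cnt) + 1 else d) := by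
  intro cnt
  induction cnt with
  | zero => intro _; simp [pvScanA, pvLastHit, PySem.List.enumerate_nil]
  | succ c ih =>
    intro hle
    have hlt : h + c < s.length := by omega
    have hwin : (s.drop h).take (c+1) = (s.drop h).take c ++ [s.getD (h+c) ' '] := by
      rw [List.take_add_one]
      have : (s.drop h)[c]? = some (s.getD (h+c) ' ') := by
        rw [List.getElem?_drop]
        rw [List.getElem?_eq_getElem hlt, List.getD_eq_getElem s ' ' hlt]
      simp [this]
    have hlen : ((s.drop h).take c).length = c := by
      simp; omega
    rw [hwin, pvLastHit_snoc, hlen]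
    have hmem : cc.contains (s.getD (h+c) ' ') = PySem.Set.contains (PySem.Set.ofList cc) (s.getD (h+c) ' ') := by
      by_cases hm : s.getD (h+c) ' ' ∈ cc
      · simp [hm, PySem.Set.contains_iff, PySem.Set.mem_ofList]
      · simp [hm, PySem.Set.contains_iff, PySem.Set.mem_ofList]
    show (if cc.contains (s.getD (h+c) ' ') then ((h+c : Nat) : Int) + 1 else pvScanA s cc h c d) = _
    rw [hmem]
    by_cases hc : PySem.Set.contains (PySem.Set.ofList cc) (s.getD (h+c) ' ') = true
    · rw [if_pos hc, if_pos hc, if_pos (by exact_mod_cast Int.natCast_nonneg c)]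
      push_cast; ring
    · rw [if_neg hc, if_neg hc]
      exact ih (by omega)

-- the two while loops produce the same parts list (A on the tail full.drop i, B on the index i)
theorem pvLoop_eq (cc : List Char) (cl : Int) :
    ∀ (fuel : Nat) (full : List Char) (i : Nat),
      i ≤ full.length → (2 ≤ cl ∨ (full.length : Int) ≤ cl) →
      pvLoopA cc cl fuel (full.drop i)
        = pvLoopB full cl (PySem.Int.floordiv cl 2) (PySem.Set.ofList cc) fuel i := by
  intro fuel
  induction fuel with
  | zero =>
    intro full i hi _
    simp only [pvLoopA, pvLoopB, List.length_drop]
    by_cases h : i < full.length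
    · rw [if_pos (by omega), if_pos h]
    · rw [if_neg (by omega), if_neg h]
  | succ fuel ih =>
    intro full i hi hpre
    have hdl : (full.drop i).length = full.length - i := List.length_drop ..
    simp only [pvLoopA, pvLoopB]
    by_cases hcond : (full.length : Int) - i > cl
    · have hcl : 2 ≤ cl := by rcases hpre with h | h <;> omega
      have hcond' : ((full.drop i).length : Int) > cl := by rw [hdl]; omega
      rw [if_pos hcond', if_pos hcond]
      have hF : PySem.Int.floordiv cl 2 = cl / 2 := PySem.Int.floordiv_eq_ediv_of_pos (by omega)
      set F := PySem.Int.floordiv cl 2 with hFdef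
      have hF1 : 1 ≤ F := by rw [hF]; omega
      have hF2 : F ≤ cl - 1 := by rw [hF]; omega
      have hFto : ((F.toNat : Nat) : Int) = F := by omega
      have hilen : (i : Int) ≤ full.length := by exact_mod_cast hi
      -- the sliced window is A's scan range
      have hslice : PySem.List.slice full (some ((i : Int) + F)) (some ((i : Int) + cl - 1))
          = ((full.drop i).drop F.toNat).take ((cl - 1 - F).toNat) := by
        rw [PySem.List.slice_toNat full (by omega) (by omega)]
        rw [List.drop_drop]
        congr 1
        · omega
        · congr 1; omega
      -- the two cut positions agree
      have hhcnt : F.toNat + (cl - 1 - F).toNat ≤ (full.drop i).length := by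
        rw [hdl]; omega
      have hscan := pvScanA_eq (full.drop i) cc F.toNat (cl - 1) ((cl - 1 - F).toNat) hhcnt
      set w := ((full.drop i).drop F.toNat).take ((cl - 1 - F).toNat) with hwdef
      set m := pvLastHit (PySem.Set.ofList cc) w with hmdef
      have hcut : pvScanA (full.drop i) cc F.toNat ((cl - 1 - F).toNat) (cl - 1)
          = (if 0 ≤ m then F + m + 1 else cl - 1) := by
        rw [hscan]; rw [hFto]
      rw [hslice, hcut]
      set cut_pos : Int := if 0 ≤ m then F + m + 1 else cl - 1 with hcpdef
      have hmb := pvLastHit_bounds (PySem.Set.ofList cc) w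
      have hwlen : (w.length : Int) ≤ cl - 1 - F := by
        rw [hwdef]; simp; omega
      have hcp1 : 1 ≤ cut_pos := by rw [hcpdef]; split_ifs with h0 <;> omega
      have hcp2 : cut_pos ≤ cl - 1 := by rw [hcpdef]; split_ifs with h0 <;> omega
      -- the appended part is the same slice
      have hhead : PySem.List.slice full (some (i : Int)) (some ((i : Int) + cut_pos))
          = (full.drop i).take cut_pos.toNat := by
        rw [PySem.List.slice_toNat full (by omega) (by omega)]
        congr 1; omega
      rw [hhead]
      congr 1
      have hdd : (full.drop i).drop cut_pos.toNat = full.drop (i + cut_pos.toNat) := by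
        rw [List.drop_drop]
      rw [hdd]
      exact ih full (i + cut_pos.toNat) (by omega) hpre
    · have hcond' : ¬ ((full.drop i).length : Int) > cl := by rw [hdl]; omega
      rw [if_neg hcond', if_neg hcond]
      simp only [List.length_drop]
      by_cases h : i < full.length
      · rw [if_pos (by omega), if_pos h]
      · rw [if_neg (by omega), if_neg h]

-- ===== VERDICT (by name: the statement is the Claim_ definition above) =====
theorem cut_long_sentence_spec : Claim_equal_cut_long_sentence := by
  intro sentence cl cc _ hpre
  unfold Spec_cut_long_sentence cut_long_sentence cut_long_sentence_alt
  have := pvLoop_eq cc.toList cl sentence.toList.length sentence.toList 0 (by simp) hpre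
  simpa using this
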